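-- pv_equiv track=rewrite | github.com/lakinduboteju/algorithm-practice | src/find_ascending_sub_arrays.py | find_ascending_sub_arrays
-- ===== SOURCE A (Python) =====
-- def find_ascending_sub_arrays(nums: list[int]) -> list[tuple[int, int]]:
--     sub_arrays = list[tuple[int, int]]()
--
--     start_idx = 0
--
--     while start_idx < len(nums):
--         sub_array_end_idx = start_idx
--         while (sub_array_end_idx < len(nums) - 1
--                and nums[sub_array_end_idx] <= nums[sub_array_end_idx + 1]):
--             sub_array_end_idx += 1
--         if sub_array_end_idx != start_idx:
--             sub_arrays.append((start_idx, sub_array_end_idx))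
--             start_idx = sub_array_end_idx
--         start_idx += 1
--
--     return sub_arrays
-- ===== SOURCE B (Python) =====
-- def find_ascending_sub_arrays(nums: list[int]) -> list[tuple[int, int]]:
--     # Single forward scan: track the start of the current non-decreasing run;
--     # on each descent (and at the end) emit the run if it has length >= 2.
--     sub_arrays = []
--     run_start = 0
--     for i in range(1, len(nums)):
--         if nums[i] < nums[i - 1]:
--             if i - 1 > run_start:
--                 sub_arrays.append((run_start, i - 1))
--             run_start = i
--     if len(nums) - 1 > run_start:
--         sub_arrays.append((run_start, len(nums) - 1))
--     return sub_arrays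
-- ===== Notes on version B (the rewrite author's own statement) =====
-- stated objective: simpler
-- what changed: Replaced A's nested while loops (outer restart plus an inner run-extension scan from each start index) by a single forward for-loop that tracks the start of the current non-decreasing run, emits a range at each descent, and flushes the last run after the loop.
import Mathlib
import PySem

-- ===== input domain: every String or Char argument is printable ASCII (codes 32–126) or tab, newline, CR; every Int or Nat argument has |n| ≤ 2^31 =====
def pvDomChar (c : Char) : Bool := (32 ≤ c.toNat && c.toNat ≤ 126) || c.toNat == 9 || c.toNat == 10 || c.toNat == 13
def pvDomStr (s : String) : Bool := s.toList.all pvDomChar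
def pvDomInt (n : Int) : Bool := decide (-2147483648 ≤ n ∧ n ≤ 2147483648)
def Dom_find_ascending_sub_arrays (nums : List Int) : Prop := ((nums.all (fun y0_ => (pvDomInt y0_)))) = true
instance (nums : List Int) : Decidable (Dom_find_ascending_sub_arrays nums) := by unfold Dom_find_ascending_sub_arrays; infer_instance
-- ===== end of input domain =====

-- B replaces A's nested while loops by a single forward scan keeping the start of the
-- current non-decreasing run (objective: simpler decomposition, same O(n) cost).

-- ===== PORT A =====
-- inner while loop of A: advance sub_array_end_idx while the run continues
-- (fuel is only a structural totality guard; nums.length steps always suffice)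
def pvInnerAF (nums : List Int) : Nat → Nat → Nat
  | 0, e => e
  | f + 1, e =>
    if e < nums.length - 1 ∧ nums.getD e 0 ≤ nums.getD (e + 1) 0 then
      pvInnerAF nums f (e + 1)
    else e

-- outer while loop of A (fuel again only a totality guard)
def pvOuterAF (nums : List Int) : Nat → Nat → List (Int × Int) → List (Int × Int)
  | 0, _, acc => acc
  | f + 1, start, acc =>
    if start < nums.length then
      let e := pvInnerAF nums nums.length start
      if e ≠ start then
        pvOuterAF nums f (e + 1) (acc ++ [((start : Int), (e : Int))])
      else
        pvOuterAF nums f (start + 1) acc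
    else acc

def find_ascending_sub_arrays (nums : List Int) : List (Int × Int) :=
  pvOuterAF nums nums.length 0 []

-- ===== PORT B =====
-- loop body of B's for-loop over range(1, len(nums))
def pvStepB (nums : List Int) (p : List (Int × Int) × Nat) (i : Nat) : List (Int × Int) × Nat :=
  if nums.getD i 0 < nums.getD (i - 1) 0 then
    ((if p.2 < i - 1 then p.1 ++ [((p.2 : Int), ((i - 1 : Nat) : Int))] else p.1), i)
  else p

-- the final flush after the loop
def pvFlushB (nums : List Int) (p : List (Int × Int) × Nat) : List (Int × Int) :=
  if p.2 < nums.length - 1 then p.1 ++ [((p.2 : Int), ((nums.length - 1 : Nat) : Int))] else p.1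

def find_ascending_sub_arrays_alt (nums : List Int) : List (Int × Int) :=
  pvFlushB nums ((List.range' 1 (nums.length - 1)).foldl (pvStepB nums) ([], 0))

-- ===== PRECONDITION & SPEC =====
def Spec_find_ascending_sub_arrays (nums : List Int) (out : List (Int × Int)) : Prop := out = find_ascending_sub_arrays_alt nums
instance (nums : List Int) (out : List (Int × Int)) : Decidable (Spec_find_ascending_sub_arrays nums out) := by unfold Spec_find_ascending_sub_arrays; infer_instance

-- ===== CLAIM (what is proved, stated in full; the proofs are below) =====
def Claim_equal_find_ascending_sub_arrays : Prop := ∀ (nums : List Int), Dom_find_ascending_sub_arrays nums → Spec_find_ascending_sub_arrays nums (find_ascending_sub_arrays nums)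

-- ===== LEMMAS AND PROOFS =====

-- characterisation of A's inner loop: with enough fuel it stops at the first
-- index k ≥ e0 where the run ends (end of array or a descent at k+1)
lemma pvInnerAF_eq (nums : List Int) (fuel e0 k : Nat)
    (hf : k ≤ e0 + fuel)
    (h1 : e0 ≤ k) (hk : k ≤ nums.length - 1)
    (hrun : ∀ j, e0 ≤ j → j < k → nums.getD j 0 ≤ nums.getD (j + 1) 0)
    (hstop : ¬(k < nums.length - 1 ∧ nums.getD k 0 ≤ nums.getD (k + 1) 0)) :
    pvInnerAF nums fuel e0 = k := by
  induction fuel generalizing e0 with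
  | zero =>
    have : e0 = k := by omega
    subst this; rfl
  | succ f ih =>
    by_cases he : e0 = k
    · subst he
      simp only [pvInnerAF]
      rw [if_neg hstop]
    · have hlt : e0 < k := by omega
      simp only [pvInnerAF]
      rw [if_pos ⟨by omega, hrun e0 le_rfl hlt⟩]
      exact ih (e0 + 1) (by omega) (by omega) (fun j hj1 hj2 => hrun j (by omega) hj2)

-- A's outer loop returns the accumulator once start has passed the end
lemma pvOuterAF_done (nums : List Int) (f s : Nat) (acc : List (Int × Int))
    (h : ¬ s < nums.length) : pvOuterAF nums f s acc = acc := by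
  cases f with
  | zero => rfl
  | succ f => simp only [pvOuterAF]; rw [if_neg h]

-- main invariant: B's scan from index i with current run start rs (where
-- nums is non-decreasing on [rs, i-1]) produces exactly what A's outer loop
-- produces when restarted at rs (with any sufficient fuel)
lemma pvMain (nums : List Int) :
    ∀ m i rs acc, i + m = nums.length → rs < i →
      (∀ j, rs ≤ j → j + 1 < i → nums.getD j 0 ≤ nums.getD (j + 1) 0) →
      ∀ F, nums.length - rs ≤ F →
      pvFlushB nums ((List.range' i m).foldl (pvStepB nums) (acc, rs)) = pvOuterAF nums F rs acc := by
  intro m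
  induction m with
  | zero =>
    intro i rs acc hlen hrs hrun F hF
    obtain ⟨f, rfl⟩ : ∃ f, F = f + 1 := ⟨F - 1, by omega⟩
    simp only [List.range', List.foldl_nil]
    simp only [pvOuterAF]
    rw [if_pos (show rs < nums.length by omega)]
    have he : pvInnerAF nums nums.length rs = nums.length - 1 :=
      pvInnerAF_eq nums nums.length rs (nums.length - 1) (by omega) (by omega) le_rfl
        (fun j hj1 hj2 => hrun j hj1 (by omega)) (by omega)
    simp only [he]
    by_cases hc : nums.length - 1 = rs
    · rw [if_neg (by omega), pvOuterAF_done nums f _ _ (by omega), pvFlushB, if_neg (by omega)]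
    · rw [if_pos (by omega), show nums.length - 1 + 1 = nums.length from by omega,
        pvOuterAF_done nums f _ _ (by omega), pvFlushB, if_pos (by omega)]
  | succ n ih =>
    intro i rs acc hlen hrs hrun F hF
    have hi1 : 1 ≤ i := by omega
    rw [List.range'_succ, List.foldl_cons]
    by_cases hd : nums.getD i 0 < nums.getD (i - 1) 0
    · -- descent at i: run [rs, i-1] ends
      obtain ⟨f, rfl⟩ : ∃ f, F = f + 1 := ⟨F - 1, by omega⟩
      have hi : i - 1 + 1 = i := by omega
      have hstep : pvStepB nums (acc, rs) i =
          ((if rs < i - 1 then acc ++ [((rs : Int), ((i - 1 : Nat) : Int))] else acc), i) := by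
        rw [pvStepB, if_pos hd]
      rw [hstep, ih (i + 1) i _ (by omega) (by omega) (fun j hj1 hj2 => by omega) f (by omega)]
      have he : pvInnerAF nums nums.length rs = i - 1 :=
        pvInnerAF_eq nums nums.length rs (i - 1) (by omega) (by omega) (by omega)
          (fun j hj1 hj2 => hrun j hj1 (by omega))
          (fun hcon => absurd (hi ▸ hcon.2) (not_le.mpr hd))
      conv_rhs => simp only [pvOuterAF]
      rw [if_pos (show rs < nums.length by omega)]
      simp only [he]
      by_cases hc : rs < i - 1
      · rw [if_pos hc, if_pos (show i - 1 ≠ rs by omega), hi]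
      · rw [if_neg hc, if_neg (show ¬(i - 1 ≠ rs) by omega), show rs + 1 = i by omega]
    · -- run continues through i
      have hstep : pvStepB nums (acc, rs) i = (acc, rs) := by rw [pvStepB, if_neg hd]
      rw [hstep]
      exact ih (i + 1) rs acc (by omega) (by omega)
        (fun j hj1 hj2 => by
          by_cases hj : j + 1 < i
          · exact hrun j hj1 hj
          · have : j = i - 1 := by omega
            subst this
            rw [show i - 1 + 1 = i from by omega]; omega) F hF

-- ===== VERDICT (by name: the statement is the Claim_ definition above) =====
theorem find_ascending_sub_arrays_spec : Claim_equal_find_ascending_sub_arrays := by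
  intro nums _
  unfold Spec_find_ascending_sub_arrays find_ascending_sub_arrays find_ascending_sub_arrays_alt
  by_cases hn : nums.length = 0
  · rw [hn]
    simp [pvOuterAF, hn, pvFlushB]
  · exact (pvMain nums (nums.length - 1) 1 0 [] (by omega) (by omega) (by omega)
      nums.length (by omega)).symm
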